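-- pv_equiv track=rewrite | github.com/Dontlike/play | twodt.py | pus
-- ===== SOURCE A (Python) =====
-- import copy as cp
--
-- def pus(lisp):
--     lis=cp.deepcopy(lisp)
--     try:
--         lis.remove(0)
--     except ValueError:
--         j=1
--     try:
--         lis.remove(0)
--     except ValueError:
--         j=1
--     try:
--         lis.remove(0)
--     except ValueError:
--         j=1
--     try:
--         lis.remove(0)
--     except ValueError:
--         j=1
--     while len(lis)<4:
--         lis.append(0)
--     return(lis)
-- ===== SOURCE B (Python) =====
-- def pus(lisp):
--     result = []
--     remaining = 4
--     for x in lisp: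
--         if x == 0 and remaining > 0:
--             remaining -= 1
--         else:
--             result.append(x)
--     result += [0] * (4 - len(result))
--     return result
-- ===== Notes on version B (the rewrite author's own statement) =====
-- stated objective: simpler
-- what changed: Replaces deepcopy plus four try/except list.remove(0) rescans and a while-append loop by one forward pass with a removal counter and arithmetic padding.
import Mathlib
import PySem

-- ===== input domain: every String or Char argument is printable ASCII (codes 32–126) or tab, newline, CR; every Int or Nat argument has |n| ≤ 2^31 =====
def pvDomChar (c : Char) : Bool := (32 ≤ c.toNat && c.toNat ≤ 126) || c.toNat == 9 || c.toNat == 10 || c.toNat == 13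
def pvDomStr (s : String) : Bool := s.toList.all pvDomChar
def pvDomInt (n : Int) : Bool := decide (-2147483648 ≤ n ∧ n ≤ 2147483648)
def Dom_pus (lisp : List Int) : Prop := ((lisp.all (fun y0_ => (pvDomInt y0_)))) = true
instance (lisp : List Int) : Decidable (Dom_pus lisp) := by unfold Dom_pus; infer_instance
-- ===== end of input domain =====

-- B replaces A's deepcopy + four try/except remove(0) rescans + while-append loop
-- by a single forward pass with a removal counter and arithmetic padding (simpler).

-- ===== PORT A =====
-- one 'try: lis.remove(0) except ValueError: pass' step (the dead 'j=1' has no effect)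
def pusRemStep (lis : List Int) : List Int := (PySem.List.remove? lis 0).getD lis

-- 'while len(lis)<4: lis.append(0)'
def pusPad (lis : List Int) : List Int :=
  if lis.length < 4 then pusPad (lis ++ [0]) else lis
termination_by 4 - lis.length
decreasing_by simp; omega

def pus (lisp : List Int) : List Int :=
  pusPad (pusRemStep (pusRemStep (pusRemStep (pusRemStep lisp))))

-- ===== PORT B =====
-- the forward pass: skip x when x == 0 and remaining > 0
def pusSkip : List Int → Nat → List Int
  | [], _ => []
  | x :: xs, remaining =>
      if x = 0 ∧ remaining > 0 then pusSkip xs (remaining - 1)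
      else x :: pusSkip xs remaining

def pus_alt (lisp : List Int) : List Int :=
  let result := pusSkip lisp 4
  result ++ List.replicate (4 - result.length) 0

-- ===== PRECONDITION & SPEC =====
def Spec_pus (lisp : List Int) (out : List Int) : Prop := out = pus_alt lisp
instance (lisp : List Int) (out : List Int) : Decidable (Spec_pus lisp out) := by unfold Spec_pus; infer_instance

-- ===== CLAIM (what is proved, stated in full; the proofs are below) =====
def Claim_equal_pus : Prop := ∀ (lisp : List Int), Dom_pus lisp → Spec_pus lisp (pus lisp)

-- ===== LEMMAS AND PROOFS =====
theorem pusSkip_zero (l : List Int) : pusSkip l 0 = l := by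
  induction l with
  | nil => rfl
  | cons x xs ih => simp [pusSkip, ih]

theorem remStep_skip (l : List Int) (n : Nat) :
    pusRemStep (pusSkip l n) = pusSkip l (n + 1) := by
  induction l generalizing n with
  | nil => rfl
  | cons x xs ih =>
    by_cases hx : x = 0
    · subst hx
      cases n with
      | zero =>
        simp [pusSkip, pusSkip_zero, pusRemStep, PySem.List.remove?_cons_self]
      | succ m =>
        have hp : (0:Int) = 0 ∧ m + 1 > 0 := ⟨rfl, Nat.succ_pos m⟩
        rw [pusSkip, if_pos hp, pusSkip, if_pos ⟨rfl, Nat.succ_pos (m+1)⟩]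
        simpa using ih m
    · have hg : ¬ (x = 0 ∧ n > 0) := fun h => hx h.1
      have hg' : ¬ (x = 0 ∧ n + 1 > 0) := fun h => hx h.1
      rw [pusSkip, if_neg hg, pusSkip, if_neg hg']
      unfold pusRemStep
      rw [PySem.List.remove?_cons_of_ne _ hx]
      cases h : PySem.List.remove? (pusSkip xs n) 0 with
      | none =>
        have hn := ih n
        unfold pusRemStep at hn
        rw [h] at hn
        simp at hn
        simp [hn, h]
      | some r =>
        have hn := ih n
        unfold pusRemStep at hn
        rw [h] at hn
        simp at hn
        simp [hn, h]

theorem pusPad_eq (l : List Int) : pusPad l = l ++ List.replicate (4 - l.length) 0 := by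
  by_cases h : l.length < 4
  · rw [pusPad, if_pos h, pusPad_eq (l ++ [0])]
    simp only [List.append_assoc, List.length_append]
    congr 1
    have h1 : 4 - l.length = (4 - (l.length + 1)) + 1 := by omega
    rw [h1]
    simp [List.replicate_succ]
  · rw [pusPad, if_neg h]
    have : 4 - l.length = 0 := by omega
    simp [this]
termination_by 4 - l.length
decreasing_by simp; omega

theorem pus_eq_alt (lisp : List Int) : pus lisp = pus_alt lisp := by
  unfold pus pus_alt
  have h : pusRemStep (pusRemStep (pusRemStep (pusRemStep lisp))) = pusSkip lisp 4 := by
    have key : pusRemStep (pusRemStep (pusRemStep (pusRemStep (pusSkip lisp 0)))) = pusSkip lisp 4 := by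
      rw [remStep_skip, remStep_skip, remStep_skip, remStep_skip]
    rwa [pusSkip_zero] at key
  rw [h, pusPad_eq]

-- ===== VERDICT (by name: the statement is the Claim_ definition above) =====
theorem pus_spec : Claim_equal_pus := by
  intro lisp _
  unfold Spec_pus
  exact pus_eq_alt lisp
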